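-- pv_equiv track=rewrite | github.com/odri96352/omique2 | time_of_comp.py | ordre
-- ===== SOURCE A (Python) =====
-- def ordre(R):
--     # nous renovie la liste order du genre (1,2,2,3,4,4,5)  et un booléen indiquant s'il y a répétition
--     index=1
--     repetition=False
--     ordre=[1]
--     for i in range(1, len(R)):
--         if R[i-1]==R[i] :
--             ordre.append(index)
--             repetition=True
--         else :
--             index+=1
--             ordre.append(index)
--
--     return ordre, repetition
-- ===== SOURCE B (Python) =====
-- def ordre(R):
--     # Different decomposition: build a 0/1 change-indicator array, prefix-sum it
--     # to obtain the rank list, and detect repetition with a separate any() scan.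
--     n = len(R)
--     changes = [1] + [0 if R[i - 1] == R[i] else 1 for i in range(1, n)]
--     ranks = []
--     total = 0
--     for c in changes:
--         total += c
--         ranks.append(total)
--     repetition = any(R[i - 1] == R[i] for i in range(1, n))
--     return ranks, repetition
-- ===== Notes on version B (the rewrite author's own statement) =====
-- stated objective: alternative
-- what changed: Replaces A's single stateful loop (rank counter + appended list + repetition flag updated together) by three independent passes: a 0/1 change-indicator array, a prefix-sum pass producing the rank list, and a separate any() scan for the repetition flag.
import Mathlib
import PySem

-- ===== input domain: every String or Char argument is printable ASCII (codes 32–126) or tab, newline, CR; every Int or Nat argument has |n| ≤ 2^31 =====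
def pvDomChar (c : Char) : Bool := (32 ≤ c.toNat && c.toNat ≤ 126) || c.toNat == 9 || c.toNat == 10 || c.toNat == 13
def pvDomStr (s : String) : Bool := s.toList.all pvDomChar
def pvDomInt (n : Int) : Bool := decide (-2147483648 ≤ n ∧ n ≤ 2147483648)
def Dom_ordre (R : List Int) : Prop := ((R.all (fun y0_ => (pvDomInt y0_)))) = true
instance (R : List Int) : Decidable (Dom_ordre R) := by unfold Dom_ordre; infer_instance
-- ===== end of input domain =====

-- B replaces A's single stateful loop by a change-indicator array, a prefix-sum pass and a separate any() scan (alternative decomposition, same cost).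

-- ===== PORT A =====
-- A's loop body: update (index, repetition, ordre) for one index i of range(1, len(R))
def ordreStep (R : List Int) (st : Int × Bool × List Int) (i : Int) : Int × Bool × List Int :=
  if PySem.List.pyGetD R (i - 1) 0 == PySem.List.pyGetD R i 0 then
    (st.1, true, st.2.2 ++ [st.1])
  else
    (st.1 + 1, st.2.1, st.2.2 ++ [st.1 + 1])

def ordre (R : List Int) : List Int × Bool :=
  let s := (PySem.List.pyRange 1 (R.length : Int) 1).foldl (ordreStep R) (1, false, [1])
  (s.2.2, s.2.1)

-- ===== PORT B =====
-- B's change indicator: 0 if R[i-1] == R[i] else 1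
def ordreChg (R : List Int) (i : Int) : Int :=
  if PySem.List.pyGetD R (i - 1) 0 == PySem.List.pyGetD R i 0 then 0 else 1

-- B's prefix-sum loop body: (total, ranks) extended by one change flag
def ordreAcc (st : Int × List Int) (c : Int) : Int × List Int :=
  (st.1 + c, st.2 ++ [st.1 + c])

def ordre_alt (R : List Int) : List Int × Bool :=
  let changes : List Int := 1 :: (PySem.List.pyRange 1 (R.length : Int) 1).map (ordreChg R)
  let acc := changes.foldl ordreAcc (0, [])
  let rep := (PySem.List.pyRange 1 (R.length : Int) 1).any
    (fun i => PySem.List.pyGetD R (i - 1) 0 == PySem.List.pyGetD R i 0)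
  (acc.2, rep)

-- ===== PRECONDITION & SPEC =====
def Spec_ordre (R : List Int) (out : List Int × Bool) : Prop := out = ordre_alt R
instance (R : List Int) (out : List Int × Bool) : Decidable (Spec_ordre R out) := by unfold Spec_ordre; infer_instance

-- ===== CLAIM (what is proved, stated in full; the proofs are below) =====
def Claim_equal_ordre : Prop := ∀ (R : List Int), Dom_ordre R → Spec_ordre R (ordre R)

-- ===== LEMMAS AND PROOFS =====

-- Loop invariant: A's fold state over range(1, 1+k) equals (B's running total,
-- B's any-scan flag, B's prefix-summed rank list).
theorem ordre_key (R : List Int) (k : Nat) :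
    (PySem.List.pyRange 1 (1 + (k : Int)) 1).foldl (ordreStep R) (1, false, [1]) =
    (let acc := ((1 : Int) :: (PySem.List.pyRange 1 (1 + (k : Int)) 1).map (ordreChg R)).foldl
        ordreAcc (0, [])
     (acc.1, (PySem.List.pyRange 1 (1 + (k : Int)) 1).any
        (fun i => PySem.List.pyGetD R (i - 1) 0 == PySem.List.pyGetD R i 0), acc.2)) := by
  induction k with
  | zero =>
    simp [ordreAcc]
  | succ k ih =>
    have hsplit : PySem.List.pyRange 1 (1 + ((k : Int) + 1)) 1 =
        PySem.List.pyRange 1 (1 + (k : Int)) 1 ++ [1 + (k : Int)] := by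
      have := PySem.List.pyRange_one_succ_right (a := 1) (b := 1 + (k : Int)) (by omega)
      simpa [add_assoc] using this
    push_cast
    rw [hsplit, List.foldl_append, List.map_append, List.any_append, ih]
    by_cases h : (PySem.List.pyGetD R (1 + (k : Int) - 1) 0 == PySem.List.pyGetD R (1 + (k : Int)) 0) = true
    · simp only [List.foldl_cons, List.foldl_nil, List.map_cons, List.map_nil, List.any_cons,
        List.any_nil, ordreStep, ordreChg, ordreAcc, h, if_true]
      simp [List.foldl_append, ordreAcc]
    · simp only [List.foldl_cons, List.foldl_nil, List.map_cons, List.map_nil, List.any_cons,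
        List.any_nil, ordreStep, ordreChg, ordreAcc, h, Bool.or_false]
      simp [List.foldl_append, ordreAcc]

-- ===== VERDICT (by name: the statement is the Claim_ definition above) =====
theorem ordre_spec : Claim_equal_ordre := by
  intro R _
  unfold Spec_ordre
  simp only [ordre, ordre_alt]
  cases R with
  | nil =>
    simp [ordreAcc]
  | cons a t =>
    have hcast : (((a :: t).length : Nat) : Int) = 1 + (t.length : Int) := by
      simp [List.length_cons]; ring
    rw [hcast, ordre_key]
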